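-- pv_equiv track=rewrite | github.com/JRF63/ROM-EL-ET-Planner | ET_planner.py | et_scorer
-- ===== SOURCE A (Python) =====
-- def et_scorer(et_data, mvp_targets, avoid_mvp,
-- 			  mini_targets, extra_mini):
-- 	scored_data = {}
-- 	for floor, mobs_dict in et_data.items():
-- 		is_mvp_floor = (floor % 10 == 0)
--
-- 		for channel, mobs in mobs_dict.items():
-- 			score = 0
-- 			if is_mvp_floor:
-- 				for mob in mobs:
-- 					if mob in mvp_targets:
-- 						score += 10
-- 					elif mob in avoid_mvp:
-- 						score -= 10
-- 			else:
-- 				for mob in mobs: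
-- 					if mob in mini_targets:
-- 						score += 10
-- 					elif mob in extra_mini:
-- 						score += 1
-- 			if floor not in scored_data:
-- 				scored_data[floor] = {}
-- 			scored_data[floor][channel] = score
--
-- 	return scored_data
-- ===== SOURCE B (Python) =====
-- def et_scorer(et_data, mvp_targets, avoid_mvp,
--               mini_targets, extra_mini):
--     # Inverted iteration: instead of scanning each channel's mob list and
--     # testing membership in four lists with if/elif, tally the mob list into
--     # an occurrence-count dict once, then score arithmetically over the
--     # (deduplicated) target sets: score = 10*|mobs in pos| + w*|mobs in neg|.
--     mvp_set = set(mvp_targets)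
--     avoid_set = set(avoid_mvp) - mvp_set
--     mini_set = set(mini_targets)
--     extra_set = set(extra_mini) - mini_set
--     scored_data = {}
--     for floor, mobs_dict in et_data.items():
--         if not mobs_dict:
--             continue
--         pos, neg, w = (mvp_set, avoid_set, -10) if floor % 10 == 0 \
--             else (mini_set, extra_set, 1)
--         inner = {}
--         for channel, mobs in mobs_dict.items():
--             cnt = {}
--             for mob in mobs:
--                 cnt[mob] = cnt.get(mob, 0) + 1
--             inner[channel] = 10 * sum(cnt[m] for m in pos & cnt.keys()) \
--                 + w * sum(cnt[m] for m in neg & cnt.keys())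
--         scored_data[floor] = inner
--     return scored_data
-- ===== Notes on version B (the rewrite author's own statement) =====
-- stated objective: alternative
-- what changed: Inverts the iteration: instead of scanning each channel's mob list and testing membership in four target lists with if/elif, B deduplicates the targets into sets once (subtracting the positive set to encode the elif priority), tallies each channel's mobs into an occurrence-count dict in one pass, and computes the score arithmetically as 10*sum(cnt[m] for m in pos & cnt.keys()) + w*sum(cnt[m] for m in neg & cnt.keys()).
import Mathlib
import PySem

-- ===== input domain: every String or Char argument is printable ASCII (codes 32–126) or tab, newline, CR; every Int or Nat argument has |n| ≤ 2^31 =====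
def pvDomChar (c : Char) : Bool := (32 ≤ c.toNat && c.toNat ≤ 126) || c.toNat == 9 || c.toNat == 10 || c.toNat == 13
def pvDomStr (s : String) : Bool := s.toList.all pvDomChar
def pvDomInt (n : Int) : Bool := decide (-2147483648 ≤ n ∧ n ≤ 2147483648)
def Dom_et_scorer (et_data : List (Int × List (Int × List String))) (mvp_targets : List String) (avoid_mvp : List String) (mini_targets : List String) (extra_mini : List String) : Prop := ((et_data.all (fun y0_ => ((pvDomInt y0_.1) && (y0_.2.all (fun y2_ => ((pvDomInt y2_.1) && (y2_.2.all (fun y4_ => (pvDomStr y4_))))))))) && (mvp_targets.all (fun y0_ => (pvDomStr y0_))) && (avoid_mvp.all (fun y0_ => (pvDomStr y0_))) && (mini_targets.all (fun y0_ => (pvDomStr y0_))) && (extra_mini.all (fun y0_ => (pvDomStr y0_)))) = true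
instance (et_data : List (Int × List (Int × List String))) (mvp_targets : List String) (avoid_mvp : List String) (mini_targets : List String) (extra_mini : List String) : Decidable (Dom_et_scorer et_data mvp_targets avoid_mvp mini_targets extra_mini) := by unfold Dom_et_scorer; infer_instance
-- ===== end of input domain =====

-- B inverts the iteration: it deduplicates the four target lists into sets once (subtracting
-- the positive set from the secondary one to encode the elif priority) and computes each
-- channel's score arithmetically from occurrence counts of the targets in the mob list;
-- same return value, different traversal (alternative, not claimed faster).

-- ===== PORT A =====
def etA_score (is_mvp_floor : Bool) (mvp_targets avoid_mvp mini_targets extra_mini : List String) (mobs : List String) : Int :=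
  if is_mvp_floor then
    mobs.foldl (fun score mob =>
      if mvp_targets.contains mob then score + 10
      else if avoid_mvp.contains mob then score - 10
      else score) 0
  else
    mobs.foldl (fun score mob =>
      if mini_targets.contains mob then score + 10
      else if extra_mini.contains mob then score + 1
      else score) 0

def etA_floorStep (mvp_targets avoid_mvp mini_targets extra_mini : List String)
    (scored_data : PySem.Dict Int (PySem.Dict Int Int)) (fc : Int × List (Int × List String)) :
    PySem.Dict Int (PySem.Dict Int Int) :=
  let is_mvp_floor := PySem.Int.mod fc.1 10 == 0
  fc.2.foldl (fun scored_data ch =>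
    let score := etA_score is_mvp_floor mvp_targets avoid_mvp mini_targets extra_mini ch.2
    let scored_data :=
      if scored_data.contains fc.1 then scored_data
      else scored_data.insert fc.1 PySem.Dict.empty
    scored_data.modify fc.1 PySem.Dict.empty (fun inner => inner.insert ch.1 score)) scored_data

def et_scorer (et_data : List (Int × List (Int × List String))) (mvp_targets : List String) (avoid_mvp : List String) (mini_targets : List String) (extra_mini : List String) : List (Int × List (Int × Int)) :=
  ((et_data.foldl (etA_floorStep mvp_targets avoid_mvp mini_targets extra_mini)
      (PySem.Dict.empty : PySem.Dict Int (PySem.Dict Int Int))).items).map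
    (fun p => (p.1, p.2.items))

-- ===== PORT B =====
-- cnt = one-pass tally of mobs; score = 10 * sum(cnt[m] for m in pos & cnt.keys()) + w * sum(... neg ...)
-- (sums over Python sets: order-independent, so the list order of PySem.Set is exact;
--  cnt[m] is ported as getD, exact here because m ∈ cnt.keys on every summed m)
def etB_channelScore (pos neg : PySem.Set String) (w : Int) (mobs : List String) : Int :=
  let cnt := mobs.foldl (fun d mob => d.insert mob (d.getD mob 0 + 1))
    (PySem.Dict.empty : PySem.Dict String Int)
  10 * (((PySem.Set.inter pos cnt.keys).map (fun m => cnt.getD m 0)).sum)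
    + w * (((PySem.Set.inter neg cnt.keys).map (fun m => cnt.getD m 0)).sum)

def etB_inner (pos neg : PySem.Set String) (w : Int) (mobs_dict : List (Int × List String)) : PySem.Dict Int Int :=
  mobs_dict.foldl (fun inner ch =>
    inner.insert ch.1 (etB_channelScore pos neg w ch.2)) PySem.Dict.empty

def et_scorer_alt (et_data : List (Int × List (Int × List String))) (mvp_targets : List String) (avoid_mvp : List String) (mini_targets : List String) (extra_mini : List String) : List (Int × List (Int × Int)) :=
  let mvp_set := PySem.Set.ofList mvp_targets
  let avoid_set := PySem.Set.diff (PySem.Set.ofList avoid_mvp) mvp_set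
  let mini_set := PySem.Set.ofList mini_targets
  let extra_set := PySem.Set.diff (PySem.Set.ofList extra_mini) mini_set
  ((et_data.foldl (fun out fc =>
      if fc.2.isEmpty then out
      else
        let pnw := if PySem.Int.mod fc.1 10 == 0 then (mvp_set, avoid_set, (-10 : Int))
                   else (mini_set, extra_set, (1 : Int))
        out.insert fc.1 (etB_inner pnw.1 pnw.2.1 pnw.2.2 fc.2))
      (PySem.Dict.empty : PySem.Dict Int (PySem.Dict Int Int))).items).map
    (fun p => (p.1, p.2.items))

-- ===== PRECONDITION & SPEC =====
-- Pre_ requires the floor keys to be pairwise distinct: the outer argument encodes a Python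
-- dict (whose keys are necessarily distinct), so an association list with a duplicated floor
-- key does not correspond to any input of the Python function; on such lists A's
-- merge-across-occurrences behaviour is accidental.
def Pre_et_scorer (et_data : List (Int × List (Int × List String))) (mvp_targets : List String) (avoid_mvp : List String) (mini_targets : List String) (extra_mini : List String) : Prop :=
  (et_data.map (·.1)).Nodup
instance (et_data : List (Int × List (Int × List String))) (mvp_targets : List String) (avoid_mvp : List String) (mini_targets : List String) (extra_mini : List String) : Decidable (Pre_et_scorer et_data mvp_targets avoid_mvp mini_targets extra_mini) := by unfold Pre_et_scorer; infer_instance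

def pvWitness_et_scorer : (List (Int × List (Int × List String))) × List String × List String × List String × List String :=
  ([((10 : Int), [((1 : Int), ["a", "b"])]), ((11 : Int), [((2 : Int), ["c"])])], ["a"], ["b"], ["c"], ["d"])

def Spec_et_scorer (et_data : List (Int × List (Int × List String))) (mvp_targets : List String) (avoid_mvp : List String) (mini_targets : List String) (extra_mini : List String) (out : List (Int × List (Int × Int))) : Prop := out = et_scorer_alt et_data mvp_targets avoid_mvp mini_targets extra_mini
instance (et_data : List (Int × List (Int × List String))) (mvp_targets : List String) (avoid_mvp : List String) (mini_targets : List String) (extra_mini : List String) (out : List (Int × List (Int × Int))) : Decidable (Spec_et_scorer et_data mvp_targets avoid_mvp mini_targets extra_mini out) := by unfold Spec_et_scorer; infer_instance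

-- ===== CLAIM (what is proved, stated in full; the proofs are below) =====
def Claim_equal_et_scorer : Prop := ∀ (et_data : List (Int × List (Int × List String))) (mvp_targets : List String) (avoid_mvp : List String) (mini_targets : List String) (extra_mini : List String), Dom_et_scorer et_data mvp_targets avoid_mvp mini_targets extra_mini → Pre_et_scorer et_data mvp_targets avoid_mvp mini_targets extra_mini → Spec_et_scorer et_data mvp_targets avoid_mvp mini_targets extra_mini (et_scorer et_data mvp_targets avoid_mvp mini_targets extra_mini)

-- ===== LEMMAS AND PROOFS =====

-- summing the indicator of one mob over a duplicate-free target set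
theorem sum_indicator (a : String) (S : List String) (hS : S.Nodup) :
    (S.map (fun m => if m == a then (1 : Int) else 0)).sum = if a ∈ S then 1 else 0 := by
  induction S with
  | nil => simp
  | cons s S ih =>
    obtain ⟨hs, hS'⟩ := List.nodup_cons.mp hS
    simp only [List.map_cons, List.sum_cons, ih hS', List.mem_cons]
    by_cases h : s = a
    · subst h
      simp [if_neg (fun hmem => hs hmem)]
    · have hb : (s == a) = false := by simp [h]
      have h' : ¬ a = s := fun hh => h hh.symm
      simp [hb, h']

-- adding one mob bumps the summed counts by the indicator
theorem sum_count_cons (S : List String) (hS : S.Nodup) (a : String) (t : List String) :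
    (S.map (fun m => ((a :: t).count m : Int))).sum =
      (S.map (fun m => (t.count m : Int))).sum + (if a ∈ S then 1 else 0) := by
  have h1 : (S.map (fun m => ((a :: t).count m : Int))).sum =
      (S.map (fun m => (t.count m : Int) + (if m == a then (1 : Int) else 0))).sum := by
    congr 1
    apply List.map_congr_left
    intro m _
    rw [List.count_cons]
    by_cases h : m = a
    · subst h; simp
    · have hb : (m == a) = false := by simp [h]
      have h' : ¬ a = m := fun hh => h hh.symm
      simp [hb, h']
  rw [h1, PySem.List.sum_map_add_int, sum_indicator a S hS]

-- the per-mob score as a pair of indicators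
theorem sum_g_eq (P N : List String) (hP : P.Nodup) (hN : N.Nodup) (w : Int)
    (g : String → Int)
    (hg : ∀ x, g x = 10 * (if x ∈ P then 1 else 0) + w * (if x ∈ N then 1 else 0)) :
    ∀ mobs : List String,
      (mobs.map g).sum =
        10 * ((P.map (fun m => (mobs.count m : Int))).sum)
          + w * ((N.map (fun m => (mobs.count m : Int))).sum) := by
  intro mobs
  induction mobs with
  | nil => simp
  | cons a t ih =>
    simp only [List.map_cons, List.sum_cons, ih, hg a,
      sum_count_cons P hP a t, sum_count_cons N hN a t]
    ring

-- restricting a sum of tally lookups to the tally's own keys drops only zero terms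
theorem sum_inter_keys (cnt : PySem.Dict String Int) (S : List String) :
    ((PySem.Set.inter S cnt.keys).map (fun m => cnt.getD m 0)).sum
      = (S.map (fun m => cnt.getD m 0)).sum := by
  induction S with
  | nil => rfl
  | cons s S ih =>
    show ((List.filter (fun x => cnt.keys.contains x) (s :: S)).map (fun m => cnt.getD m 0)).sum = _
    have ihf : ((List.filter (fun x => cnt.keys.contains x) S).map (fun m => cnt.getD m 0)).sum
        = (S.map (fun m => cnt.getD m 0)).sum := ih
    rw [List.filter_cons]
    by_cases hb : cnt.keys.contains s = true
    · rw [if_pos hb, List.map_cons, List.sum_cons, ihf, List.map_cons, List.sum_cons]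
    · have hm : s ∉ cnt.keys := by simpa using hb
      have hc : cnt.contains s = false :=
        Bool.eq_false_iff.mpr (fun hh => hm ((PySem.Dict.contains_iff_mem_keys cnt s).mp hh))
      rw [if_neg hb, ihf, List.map_cons, List.sum_cons,
        PySem.Dict.getD_of_not_contains cnt 0 hc, zero_add]

-- B's tally-dict lookups are occurrence counts
theorem channelScore_counts (pos neg : PySem.Set String) (w : Int) (mobs : List String) :
    etB_channelScore pos neg w mobs =
      10 * ((pos.map (fun m => (mobs.count m : Int))).sum)
        + w * ((neg.map (fun m => (mobs.count m : Int))).sum) := by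
  unfold etB_channelScore
  have h : ∀ S : List String,
      (S.map (fun m => (mobs.foldl (fun d mob => d.insert mob (d.getD mob 0 + 1))
        (PySem.Dict.empty : PySem.Dict String Int)).getD m 0)).sum =
      (S.map (fun m => (mobs.count m : Int))).sum := by
    intro S
    congr 1
    apply List.map_congr_left
    intro m _
    rw [PySem.Dict.getD_foldl_insert_add_one, PySem.Dict.getD_empty, zero_add]
  simp only [sum_inter_keys]
  simp only [h]

-- A's per-channel membership scan equals B's count-over-targets formula (MVP floor)
theorem score_eq_true (m a mi e : List String) (mobs : List String) :
    etA_score true m a mi e mobs =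
      etB_channelScore (PySem.Set.ofList m)
        (PySem.Set.diff (PySem.Set.ofList a) (PySem.Set.ofList m)) (-10) mobs := by
  rw [channelScore_counts]
  unfold etA_score
  have hg : ∀ x : String,
      (if m.contains x then (10 : Int) else if a.contains x then (-10) else 0) =
        10 * (if x ∈ PySem.Set.ofList m then 1 else 0)
          + (-10) * (if x ∈ PySem.Set.diff (PySem.Set.ofList a) (PySem.Set.ofList m) then 1 else 0) := by
    intro x
    by_cases h1 : x ∈ m
    · simp [h1, PySem.Set.mem_diff, PySem.Set.mem_ofList]
    · by_cases h2 : x ∈ a <;>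
        simp [h1, h2, PySem.Set.mem_diff, PySem.Set.mem_ofList]
  have hfun : (fun (score : Int) (mob : String) =>
      if m.contains mob then score + 10
      else if a.contains mob then score - 10
      else score) =
      (fun s x => s + (if m.contains x then (10 : Int) else if a.contains x then (-10) else 0)) := by
    funext s x
    by_cases h1 : x ∈ m
    · simp [h1]
    · by_cases h2 : x ∈ a <;> simp [h1, h2, sub_eq_add_neg]
  simp only [if_true, hfun]
  rw [PySem.List.foldl_add, zero_add]
  have hmap : (List.map (fun x => if m.contains x then (10 : Int) else if a.contains x then (-10) else 0) mobs).sum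
      = (mobs.map (fun x => 10 * (if x ∈ PySem.Set.ofList m then (1 : Int) else 0)
          + (-10) * (if x ∈ PySem.Set.diff (PySem.Set.ofList a) (PySem.Set.ofList m) then 1 else 0))).sum := by
    congr 1
    exact List.map_congr_left (fun x _ => hg x)
  rw [hmap,
    sum_g_eq (PySem.Set.ofList m) (PySem.Set.diff (PySem.Set.ofList a) (PySem.Set.ofList m))
      (PySem.Set.nodup_ofList m) (PySem.Set.nodup_diff _ _ (PySem.Set.nodup_ofList a))
      (-10) _ (fun _ => rfl) mobs]

-- A's per-channel membership scan equals B's count-over-targets formula (mini floor)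
theorem score_eq_false (m a mi e : List String) (mobs : List String) :
    etA_score false m a mi e mobs =
      etB_channelScore (PySem.Set.ofList mi)
        (PySem.Set.diff (PySem.Set.ofList e) (PySem.Set.ofList mi)) 1 mobs := by
  rw [channelScore_counts]
  unfold etA_score
  have hg : ∀ x : String,
      (if mi.contains x then (10 : Int) else if e.contains x then 1 else 0) =
        10 * (if x ∈ PySem.Set.ofList mi then 1 else 0)
          + 1 * (if x ∈ PySem.Set.diff (PySem.Set.ofList e) (PySem.Set.ofList mi) then 1 else 0) := by
    intro x
    by_cases h1 : x ∈ mi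
    · simp [h1, PySem.Set.mem_diff, PySem.Set.mem_ofList]
    · by_cases h2 : x ∈ e <;>
        simp [h1, h2, PySem.Set.mem_diff, PySem.Set.mem_ofList]
  have hfun : (fun (score : Int) (mob : String) =>
      if mi.contains mob then score + 10
      else if e.contains mob then score + 1
      else score) =
      (fun s x => s + (if mi.contains x then (10 : Int) else if e.contains x then 1 else 0)) := by
    funext s x
    by_cases h1 : x ∈ mi
    · simp [h1]
    · by_cases h2 : x ∈ e <;> simp [h1, h2]
  simp only [Bool.false_eq_true, if_false, hfun]
  rw [PySem.List.foldl_add, zero_add]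
  have hmap : (List.map (fun x => if mi.contains x then (10 : Int) else if e.contains x then 1 else 0) mobs).sum
      = (mobs.map (fun x => 10 * (if x ∈ PySem.Set.ofList mi then (1 : Int) else 0)
          + 1 * (if x ∈ PySem.Set.diff (PySem.Set.ofList e) (PySem.Set.ofList mi) then 1 else 0))).sum := by
    congr 1
    exact List.map_congr_left (fun x _ => hg x)
  rw [hmap,
    sum_g_eq (PySem.Set.ofList mi) (PySem.Set.diff (PySem.Set.ofList e) (PySem.Set.ofList mi))
      (PySem.Set.nodup_ofList mi) (PySem.Set.nodup_diff _ _ (PySem.Set.nodup_ofList e))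
      1 _ (fun _ => rfl) mobs]

-- A's channel loop, once the floor key is the freshly inserted last entry
theorem blockA (f : Int × List String → Int) (floor : Int)
    (chans : List (Int × List String)) :
    ∀ (d : PySem.Dict Int (PySem.Dict Int Int)) (inner : PySem.Dict Int Int),
    chans.foldl (fun sc ch =>
        (if sc.contains floor then sc else sc.insert floor PySem.Dict.empty).modify floor
          PySem.Dict.empty (fun i => i.insert ch.1 (f ch)))
      (d.insert floor inner)
    = d.insert floor (chans.foldl (fun i ch => i.insert ch.1 (f ch)) inner) := by
  induction chans with
  | nil => intro d inner; rfl
  | cons c cs ih =>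
    intro d inner
    have hc : (d.insert floor inner).contains floor = true :=
      PySem.Dict.contains_insert_self d floor inner
    simp only [List.foldl_cons, if_pos hc]
    have hmod : (d.insert floor inner).modify floor PySem.Dict.empty
        (fun i => i.insert c.1 (f c)) = d.insert floor (inner.insert c.1 (f c)) := by
      show (d.insert floor inner).insert floor
          (((d.insert floor inner).getD floor PySem.Dict.empty).insert c.1 (f c)) = _
      rw [PySem.Dict.getD_insert_self, PySem.Dict.insert_insert_self]
    rw [hmod, ih]

-- one floor of A = one floor of B, on a fresh floor key
theorem floorStep_eq (m a mi e : List String) (d : PySem.Dict Int (PySem.Dict Int Int))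
    (fc : Int × List (Int × List String)) (hd : d.contains fc.1 = false) :
    etA_floorStep m a mi e d fc =
      if fc.2.isEmpty then d
      else
        let pnw := if PySem.Int.mod fc.1 10 == 0
                   then (PySem.Set.ofList m, PySem.Set.diff (PySem.Set.ofList a) (PySem.Set.ofList m), (-10 : Int))
                   else (PySem.Set.ofList mi, PySem.Set.diff (PySem.Set.ofList e) (PySem.Set.ofList mi), (1 : Int))
        d.insert fc.1 (etB_inner pnw.1 pnw.2.1 pnw.2.2 fc.2) := by
  unfold etA_floorStep etB_inner
  cases hch : fc.2 with
  | nil => simp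
  | cons c cs =>
    rw [if_neg (by simp : ¬((c :: cs).isEmpty = true))]
    simp only [List.foldl_cons]
    rw [if_neg (show ¬(d.contains fc.1 = true) by simp [hd])]
    have hmod : ∀ (g : PySem.Dict Int Int → PySem.Dict Int Int),
        (d.insert fc.1 PySem.Dict.empty).modify fc.1 PySem.Dict.empty g
          = d.insert fc.1 (g PySem.Dict.empty) := by
      intro g
      show (d.insert fc.1 PySem.Dict.empty).insert fc.1
          (g ((d.insert fc.1 PySem.Dict.empty).getD fc.1 PySem.Dict.empty)) = _
      rw [PySem.Dict.getD_insert_self, PySem.Dict.insert_insert_self]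
    rw [hmod]
    rw [blockA (fun ch => etA_score (PySem.Int.mod fc.1 10 == 0) m a mi e ch.2) fc.1 cs d]
    cases hb : (PySem.Int.mod fc.1 10 == 0) with
    | true =>
      simp only [if_true]
      have hstep : (fun (i : PySem.Dict Int Int) (ch : Int × List String) =>
          i.insert ch.1 (etA_score true m a mi e ch.2)) =
          (fun (i : PySem.Dict Int Int) (ch : Int × List String) =>
            i.insert ch.1 (etB_channelScore (PySem.Set.ofList m)
              (PySem.Set.diff (PySem.Set.ofList a) (PySem.Set.ofList m)) (-10) ch.2)) := by
        funext i ch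
        rw [score_eq_true m a mi e ch.2]
      rw [hstep, score_eq_true m a mi e c.2]
    | false =>
      simp only [Bool.false_eq_true, if_false]
      have hstep : (fun (i : PySem.Dict Int Int) (ch : Int × List String) =>
          i.insert ch.1 (etA_score false m a mi e ch.2)) =
          (fun (i : PySem.Dict Int Int) (ch : Int × List String) =>
            i.insert ch.1 (etB_channelScore (PySem.Set.ofList mi)
              (PySem.Set.diff (PySem.Set.ofList e) (PySem.Set.ofList mi)) 1 ch.2)) := by
        funext i ch
        rw [score_eq_false m a mi e ch.2]
      rw [hstep, score_eq_false m a mi e c.2]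

-- the whole traversal: the two accumulators stay equal while floors are fresh
theorem main_fold_eq (m a mi e : List String) (ed : List (Int × List (Int × List String))) :
    ∀ (d : PySem.Dict Int (PySem.Dict Int Int)),
    (∀ fc ∈ ed, d.contains fc.1 = false) → (ed.map (·.1)).Nodup →
    ed.foldl (etA_floorStep m a mi e) d =
      ed.foldl (fun out fc =>
        if fc.2.isEmpty then out
        else
          let pnw := if PySem.Int.mod fc.1 10 == 0
                     then (PySem.Set.ofList m, PySem.Set.diff (PySem.Set.ofList a) (PySem.Set.ofList m), (-10 : Int))
                     else (PySem.Set.ofList mi, PySem.Set.diff (PySem.Set.ofList e) (PySem.Set.ofList mi), (1 : Int))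
          out.insert fc.1 (etB_inner pnw.1 pnw.2.1 pnw.2.2 fc.2)) d := by
  induction ed with
  | nil => intro d _ _; rfl
  | cons fc rest ih =>
    intro d hfresh hnd
    rw [List.map_cons] at hnd
    obtain ⟨hnotin, hnd'⟩ := List.nodup_cons.mp hnd
    simp only [List.foldl_cons]
    rw [floorStep_eq m a mi e d fc (hfresh fc List.mem_cons_self)]
    apply ih
    · intro fc' hfc'
      by_cases hch : fc.2.isEmpty = true
      · rw [if_pos hch]
        exact hfresh fc' (List.mem_cons_of_mem _ hfc')
      · rw [if_neg hch]
        simp only []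
        rw [PySem.Dict.contains_insert]
        have h1 : fc'.1 ≠ fc.1 := by
          intro hEq
          exact hnotin (hEq ▸ List.mem_map_of_mem hfc')
        have h2 : (fc'.1 == fc.1) = false := by simp [h1]
        rw [h2, Bool.false_or]
        exact hfresh fc' (List.mem_cons_of_mem _ hfc')
    · exact hnd'

-- ===== VERDICT (by name: the statement is the Claim_ definition above) =====
theorem et_scorer_spec : Claim_equal_et_scorer := by
  intro et_data m a mi e _ hpre
  unfold Spec_et_scorer et_scorer et_scorer_alt
  rw [main_fold_eq m a mi e et_data PySem.Dict.empty
        (fun fc _ => PySem.Dict.contains_empty fc.1) hpre]
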